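-- pv_equiv track=rewrite | github.com/KingJonik/Word_Squares_Solver | word_square_finder.py | reduce_starts_with_words
-- ===== SOURCE A (Python) =====
-- def reduce_starts_with_words(words, word_0):
--     """
--     Efficiency Measure: word_j for j > 0 will start with the j-th index of word_0, so remove those that don't.
--
--     Keeps each word that has a starting index that is in the 1:(max_length) index range of word_0.
--     :return: List of words to keep.
--     """
--     start_letters = word_0[1:]
--     check_list = [bit for bit in word_0[1:]]
--     words_to_keep = []
--     for word in words:
--         if word[0] in start_letters:
--             words_to_keep.append(word)
--             # Tick off checklist to ensure we have words for every character
--             if word[0] in check_list: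
--                 check_list.remove(word[0])
--
--     if len(check_list) == 0:
--         return words_to_keep
--     else:
--         return []
-- ===== SOURCE B (Python) =====
-- def reduce_starts_with_words(words, word_0):
--     tail = word_0[1:]
--     words_to_keep = [word for word in words if word[0] in tail]
--     firsts = [word[0] for word in words_to_keep]
--     if all(firsts.count(c) >= tail.count(c) for c in tail):
--         return words_to_keep
--     return []
-- ===== Notes on version B (the rewrite author's own statement) =====
-- stated objective: simpler
-- what changed: A interleaves filtering with mutably ticking letters off a checklist (list.remove, a Python-level O(m) scan per kept word) in one loop and tests the leftover checklist; B first filters the words, then decides coverage by comparing occurrence counts (firsts.count(c) >= tail.count(c) for each needed letter), with no mutable checklist.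
import Mathlib
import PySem

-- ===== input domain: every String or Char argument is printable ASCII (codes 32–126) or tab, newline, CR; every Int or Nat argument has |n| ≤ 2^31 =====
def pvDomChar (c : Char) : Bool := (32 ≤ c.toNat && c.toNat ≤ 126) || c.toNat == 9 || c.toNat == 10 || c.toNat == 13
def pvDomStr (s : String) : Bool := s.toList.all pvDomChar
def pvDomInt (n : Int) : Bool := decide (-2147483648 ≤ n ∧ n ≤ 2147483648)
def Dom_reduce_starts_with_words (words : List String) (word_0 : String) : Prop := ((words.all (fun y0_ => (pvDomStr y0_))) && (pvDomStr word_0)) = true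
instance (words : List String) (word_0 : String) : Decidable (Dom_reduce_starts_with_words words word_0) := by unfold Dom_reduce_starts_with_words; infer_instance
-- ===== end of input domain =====

-- B replaces A's single interleaved filter-and-checklist-removal loop by a filter pass
-- followed by an occurrence-count comparison (simpler decomposition, no mutable checklist).


-- ===== PORT A =====
-- one loop iteration of A: append the word if its first letter is in word_0[1:],
-- and tick that letter off the checklist (list.remove = erase first occurrence)
def pvStepA (start_letters : List Char) (st : List String × List Char) (word : String) : List String × List Char :=
  match PySem.Str.pyGet? word 0 with          -- word[0]; none = IndexError, excluded by Pre_
  | none => st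
  | some c =>
    if c ∈ start_letters then                  -- 'word[0] in start_letters' (1-char substring test = membership)
      (st.1 ++ [word],
       if c ∈ st.2 then (PySem.List.remove? st.2 c).getD st.2 else st.2)
    else st

def reduce_starts_with_words (words : List String) (word_0 : String) : List String :=
  let start_letters := PySem.List.slice word_0.toList (some 1) none   -- word_0[1:]
  let check_list := start_letters                                     -- [bit for bit in word_0[1:]]
  let st := words.foldl (pvStepA start_letters) ([], check_list)
  if st.2.length = 0 then st.1 else []

-- ===== PORT B =====
def reduce_starts_with_words_alt (words : List String) (word_0 : String) : List String :=
  let tail := PySem.List.slice word_0.toList (some 1) none            -- word_0[1:]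
  let kept := words.filter (fun w =>
    match PySem.Str.pyGet? w 0 with                                   -- w[0]; none = IndexError, excluded by Pre_
    | none => false
    | some c => decide (c ∈ tail))
  let firsts := kept.filterMap (fun w => PySem.Str.pyGet? w 0)        -- [w[0] for w in kept]
  if tail.all (fun c => decide (tail.count c ≤ firsts.count c)) then kept else []

-- ===== PRECONDITION & SPEC =====
-- Pre_ excludes exactly the inputs where Python A raises IndexError: a list containing the empty word
def Pre_reduce_starts_with_words (words : List String) (word_0 : String) : Prop :=
  ∀ w ∈ words, w ≠ ""
instance (words : List String) (word_0 : String) : Decidable (Pre_reduce_starts_with_words words word_0) := by unfold Pre_reduce_starts_with_words; infer_instance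

def pvWitness_reduce_starts_with_words : List String × String := (["ab", "ba"], "ab")

def Spec_reduce_starts_with_words (words : List String) (word_0 : String) (out : List String) : Prop := out = reduce_starts_with_words_alt words word_0
instance (words : List String) (word_0 : String) (out : List String) : Decidable (Spec_reduce_starts_with_words words word_0 out) := by unfold Spec_reduce_starts_with_words; infer_instance

-- ===== CLAIM (what is proved, stated in full; the proofs are below) =====
def Claim_equal_reduce_starts_with_words : Prop := ∀ (words : List String) (word_0 : String), Dom_reduce_starts_with_words words word_0 → Pre_reduce_starts_with_words words word_0 → Spec_reduce_starts_with_words words word_0 (reduce_starts_with_words words word_0)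

-- ===== LEMMAS AND PROOFS =====

-- A's loop, on nonempty words, is B's filter together with erasing the kept words' first letters
lemma pvLoopA (tail : List Char) (ws : List String) (h : ∀ w ∈ ws, w ≠ "")
    (keep : List String) (cl : List Char) :
    ws.foldl (pvStepA tail) (keep, cl) =
      (keep ++ ws.filter (fun w =>
          match PySem.Str.pyGet? w 0 with
          | none => false
          | some c => decide (c ∈ tail)),
       ((ws.filter (fun w =>
          match PySem.Str.pyGet? w 0 with
          | none => false
          | some c => decide (c ∈ tail))).filterMap
            (fun w => PySem.Str.pyGet? w 0)).foldl List.erase cl) := by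
  induction ws generalizing keep cl with
  | nil => simp
  | cons w ws ih =>
    have hw : w ≠ "" := h w (by simp)
    obtain ⟨c, cs, hcs⟩ : ∃ c cs, w.toList = c :: cs := by
      cases hcl : w.toList with
      | nil => exact absurd (by ext1; simp [hcl]) hw
      | cons c cs => exact ⟨c, cs, rfl⟩
    have hget : PySem.Str.pyGet? w 0 = some c := by
      simp [PySem.Str.pyGet?, PySem.Chars.pyGet?, PySem.List.pyGet?, PySem.List.pyIdx?, hcs]
    have hget' : PySem.List.pyGet? w.toList 0 = some c := by
      simp [PySem.List.pyGet?, PySem.List.pyIdx?, hcs]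
    have h' : ∀ x ∈ ws, x ≠ "" := fun x hx => h x (by simp [hx])
    by_cases hc : c ∈ tail
    · have herase : (if c ∈ cl then (PySem.List.remove? cl c).getD cl else cl) = cl.erase c := by
        by_cases hm : c ∈ cl
        · simp [hm, PySem.List.remove?_eq_some_erase cl c hm]
        · simp [hm, List.erase_of_not_mem hm]
      rw [List.foldl_cons, List.filter_cons]
      simp only [pvStepA, hget, hc, decide_true, if_true, herase]
      rw [ih h' (keep ++ [w]) (cl.erase c)]
      simp [hget']
    · rw [List.foldl_cons, List.filter_cons]
      simp only [pvStepA, hget, hc, decide_false, Bool.false_eq_true, if_false]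
      exact ih h' keep cl

-- counting after repeatedly erasing first occurrences
lemma pvCountFoldlErase (l : List Char) (init : List Char) (c : Char) :
    (l.foldl List.erase init).count c = init.count c - l.count c := by
  induction l generalizing init with
  | nil => simp
  | cons x l ih =>
    simp only [List.foldl_cons, List.count_cons, ih]
    rw [List.count_erase]
    by_cases hx : c = x
    · simp [hx]; omega
    · simp [Ne.symm hx]

-- the leftover checklist is empty iff the kept first letters cover every needed letter
lemma pvEmptyIff (tail l : List Char) :
    l.foldl List.erase tail = [] ↔ ∀ c ∈ tail, tail.count c ≤ l.count c := by
  constructor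
  · intro hnil c hc
    have := pvCountFoldlErase l tail c
    rw [hnil] at this
    simp at this
    omega
  · intro hcov
    rw [List.eq_nil_iff_forall_not_mem]
    intro c hc
    have hcount : 0 < (l.foldl List.erase tail).count c := List.count_pos_iff.mpr hc
    have heq := pvCountFoldlErase l tail c
    have hmem : c ∈ tail := List.count_pos_iff.mp (by omega)
    have := hcov c hmem
    omega

-- ===== VERDICT (by name: the statement is the Claim_ definition above) =====
theorem reduce_starts_with_words_spec : Claim_equal_reduce_starts_with_words := by
  intro words word_0 _hdom hpre
  unfold Spec_reduce_starts_with_words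
  unfold reduce_starts_with_words reduce_starts_with_words_alt
  simp only []
  rw [pvLoopA _ words hpre [] _]
  set tail := PySem.List.slice word_0.toList (some 1) none with htail
  set kept := words.filter (fun w =>
      match PySem.Str.pyGet? w 0 with
      | none => false
      | some c => decide (c ∈ tail)) with hkept
  set firsts := kept.filterMap (fun w => PySem.Str.pyGet? w 0) with hfirsts
  simp only [List.nil_append]
  by_cases hcond : ∀ c ∈ tail, tail.count c ≤ firsts.count c
  · have hnil : firsts.foldl List.erase tail = [] := (pvEmptyIff tail firsts).mpr hcond
    have hall : (tail.all (fun c => decide (tail.count c ≤ firsts.count c))) = true := by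
      simp only [List.all_eq_true, decide_eq_true_eq]; exact hcond
    rw [hnil]
    simp [hall]
  · have hne : firsts.foldl List.erase tail ≠ [] := fun hn => hcond ((pvEmptyIff tail firsts).mp hn)
    have hnall : (tail.all (fun c => decide (tail.count c ≤ firsts.count c))) ≠ true := by
      intro hall
      exact hcond (fun c hc => by simpa using List.all_eq_true.mp hall c hc)
    rw [if_neg (fun h0 => hne (List.length_eq_zero_iff.mp h0)), if_neg hnall]
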